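-- pv_equiv track=rewrite | github.com/MohamedWElteir/Search-Engine-In-Python | src/search_algorithms.py | calculate_collection_frequencies
-- ===== SOURCE A (Python) =====
-- def calculate_collection_frequencies(documents):
--     collection_freq = {}
--     for doc in documents:
--         doc=doc.split()
--         for term in doc:
--             if term in collection_freq:
--                 collection_freq[term] += 1
--             else:
--                 collection_freq[term] = 1
--     return collection_freq
-- ===== SOURCE B (Python) =====
-- def calculate_collection_frequencies(documents):
--     # Staged passes: flatten all tokens, dedupe in first-occurrence order,
--     # then count each distinct term with list.count.
--     tokens = []
--     for doc in documents:
--         tokens += doc.split()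
--     seen = []
--     for t in tokens:
--         if t not in seen:
--             seen.append(t)
--     return {t: tokens.count(t) for t in seen}
-- ===== Notes on version B (the rewrite author's own statement) =====
-- stated objective: alternative
-- what changed: B replaces A's incremental dict update with three staged passes: flatten all documents into one token list, dedupe it in first-occurrence order, then count each distinct term with list.count.
import Mathlib
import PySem

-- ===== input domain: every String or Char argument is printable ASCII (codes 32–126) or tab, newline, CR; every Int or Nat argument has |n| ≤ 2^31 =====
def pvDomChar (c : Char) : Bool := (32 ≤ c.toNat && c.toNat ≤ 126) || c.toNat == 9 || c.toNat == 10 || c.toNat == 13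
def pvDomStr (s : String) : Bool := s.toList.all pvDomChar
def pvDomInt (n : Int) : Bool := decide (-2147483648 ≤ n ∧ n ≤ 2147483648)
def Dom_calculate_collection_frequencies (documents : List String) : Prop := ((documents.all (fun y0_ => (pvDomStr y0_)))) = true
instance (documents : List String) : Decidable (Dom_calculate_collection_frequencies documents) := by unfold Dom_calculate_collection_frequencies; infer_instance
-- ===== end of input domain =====

-- B counts in staged passes (flatten all tokens, dedupe in first-occurrence order, count each
-- distinct term) instead of A's incremental dict update; alternative structure, not faster.

-- ===== PORT A =====
def calculate_collection_frequencies (documents : List String) : List (String × Int) :=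
  (documents.foldl
    (fun cf doc =>
      (PySem.Str.split₀ doc).foldl
        (fun cf term =>
          if cf.contains term then cf.insert term (cf.getD term 0 + 1)
          else cf.insert term 1)
        cf)
    PySem.Dict.empty).items

-- ===== PORT B =====
def calculate_collection_frequencies_alt (documents : List String) : List (String × Int) :=
  let tokens := documents.foldl (fun acc doc => acc ++ PySem.Str.split₀ doc) []
  let seen := tokens.foldl (fun s t => PySem.Set.add s t) PySem.Set.empty
  seen.map (fun t => (t, (tokens.count t : Int)))

-- ===== PRECONDITION & SPEC =====
def Spec_calculate_collection_frequencies (documents : List String) (out : List (String × Int)) : Prop := out = calculate_collection_frequencies_alt documents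
instance (documents : List String) (out : List (String × Int)) : Decidable (Spec_calculate_collection_frequencies documents out) := by unfold Spec_calculate_collection_frequencies; infer_instance

-- ===== CLAIM (what is proved, stated in full; the proofs are below) =====
def Claim_equal_calculate_collection_frequencies : Prop := ∀ (documents : List String), Dom_calculate_collection_frequencies documents → Spec_calculate_collection_frequencies documents (calculate_collection_frequencies documents)

-- ===== LEMMAS AND PROOFS =====

-- A's if-branch is exactly dict.modify with default 0.
theorem pvStepA (cf : PySem.Dict String Int) (t : String) :
    (if cf.contains t then cf.insert t (cf.getD t 0 + 1) else cf.insert t 1)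
      = cf.modify t 0 (· + 1) := by
  by_cases h : cf.contains t
  · simp [h, PySem.Dict.modify]
  · simp only [h, if_neg, Bool.false_eq_true, not_false_eq_true, PySem.Dict.modify,
      PySem.Dict.getD_of_not_contains cf 0 (by simpa using h)]
    norm_num

-- A's nested per-document loop is the counting loop over the flattened token list.
theorem pvNested (docs : List String) (g : PySem.Dict String Int → String → PySem.Dict String Int) :
    ∀ (d : PySem.Dict String Int),
    docs.foldl (fun cf doc => (PySem.Str.split₀ doc).foldl g cf) d
      = (docs.flatMap (fun doc => PySem.Str.split₀ doc)).foldl g d := by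
  induction docs with
  | nil => intro d; rfl
  | cons doc docs ih =>
    intro d
    simp only [List.foldl_cons, List.flatMap_cons, List.foldl_append]
    exact ih _

-- ===== VERDICT (by name: the statement is the Claim_ definition above) =====
theorem calculate_collection_frequencies_spec : Claim_equal_calculate_collection_frequencies := by
  intro documents _
  unfold Spec_calculate_collection_frequencies
  unfold calculate_collection_frequencies calculate_collection_frequencies_alt
  simp only [PySem.List.foldl_append_eq_flatMap (g := fun doc => PySem.Str.split₀ doc),
    List.nil_append, ← PySem.Set.ofList_eq_foldl, PySem.Set.empty]
  have hA : (documents.foldl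
      (fun cf doc => (PySem.Str.split₀ doc).foldl
        (fun cf term =>
          if cf.contains term then cf.insert term (cf.getD term 0 + 1)
          else cf.insert term 1) cf)
      PySem.Dict.empty)
      = PySem.Dict.counter (documents.flatMap (fun doc => PySem.Str.split₀ doc)) := by
    rw [PySem.Dict.counter_eq_foldl, ← pvNested]
    apply PySem.List.foldl_congr_mem
    intro acc doc _
    apply PySem.List.foldl_congr_mem
    intro cf t _
    exact pvStepA cf t
  rw [hA, PySem.Dict.items_counter]
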